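-- pv_equiv track=rewrite | github.com/laizhenhai88/pil | sliderBreakDy.py | find_near_all
-- ===== SOURCE A (Python) =====
-- def find_near_all(find_p, distance):
--     p = []
--     nearest = 30
--     for i in range(0, len(find_p) -1):
--         for j in range(i+1, len(find_p)):
--             near1 = abs(abs(find_p[j] - find_p[i]) - distance)
--             if near1 < nearest:
--                 p.append([find_p[i], find_p[j]])
--     return p
-- ===== SOURCE B (Python) =====
-- def find_near_all(find_p, distance):
--     # Structural head/tail sweep: peel off the head, pair it with every later
--     # value whose absolute gap lies strictly inside (distance-30, distance+30).
--     lo, hi = distance - 30, distance + 30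
--     acc = []
--     rest = find_p
--     while rest:
--         x, rest = rest[0], rest[1:]
--         acc.extend([x, y] for y in rest if lo < abs(y - x) < hi)
--     return acc
-- ===== Notes on version B (the rewrite author's own statement) =====
-- stated objective: simpler
-- what changed: Replaces A's nested index loops (range/len indexing with a double abs threshold test) by a structural head/tail sweep that pairs each popped head with the later values whose absolute gap lies in the open interval (distance-30, distance+30).
import Mathlib
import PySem

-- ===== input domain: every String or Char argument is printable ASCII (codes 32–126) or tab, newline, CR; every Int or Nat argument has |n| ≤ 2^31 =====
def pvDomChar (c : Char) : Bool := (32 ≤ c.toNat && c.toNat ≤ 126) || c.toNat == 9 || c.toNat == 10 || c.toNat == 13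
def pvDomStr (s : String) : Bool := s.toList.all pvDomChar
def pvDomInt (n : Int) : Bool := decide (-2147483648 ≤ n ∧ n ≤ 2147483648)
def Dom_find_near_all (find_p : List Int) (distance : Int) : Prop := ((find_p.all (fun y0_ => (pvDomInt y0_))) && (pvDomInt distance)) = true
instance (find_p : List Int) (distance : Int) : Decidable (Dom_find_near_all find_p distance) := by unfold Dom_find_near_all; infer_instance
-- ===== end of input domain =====

-- B replaces A's nested index loops by a structural head/tail sweep whose threshold
-- test is rewritten as an interval check; objective: simpler (same O(n^2) cost).

-- ===== PORT A =====
def find_near_all (find_p : List Int) (distance : Int) : List (List Int) :=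
  let nearest : Int := 30
  (PySem.List.pyRange 0 (PySem.List.len find_p - 1) 1).foldl (fun p i =>
    (PySem.List.pyRange (i + 1) (PySem.List.len find_p) 1).foldl (fun p j =>
      let near1 := |(|PySem.List.pyGetD find_p j 0 - PySem.List.pyGetD find_p i 0|) - distance|
      if near1 < nearest then p ++ [[PySem.List.pyGetD find_p i 0, PySem.List.pyGetD find_p j 0]]
      else p) p) []

-- ===== PORT B =====
-- Source B's while loop: pop the head x, extend acc with x's block, continue on the tail
def altLoop (lo hi : Int) (acc : List (List Int)) : List Int → List (List Int)
  | [] => acc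
  | x :: rest =>
      altLoop lo hi
        (acc ++ (rest.filter (fun y => decide (lo < |y - x| ∧ |y - x| < hi))).map (fun y => [x, y]))
        rest

def find_near_all_alt (find_p : List Int) (distance : Int) : List (List Int) :=
  altLoop (distance - 30) (distance + 30) [] find_p

-- ===== PRECONDITION & SPEC =====
def Spec_find_near_all (find_p : List Int) (distance : Int) (out : List (List Int)) : Prop := out = find_near_all_alt find_p distance
instance (find_p : List Int) (distance : Int) (out : List (List Int)) : Decidable (Spec_find_near_all find_p distance out) := by unfold Spec_find_near_all; infer_instance

-- ===== CLAIM (what is proved, stated in full; the proofs are below) =====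
def Claim_equal_find_near_all : Prop := ∀ (find_p : List Int) (distance : Int), Dom_find_near_all find_p distance → Spec_find_near_all find_p distance (find_near_all find_p distance)

-- ===== LEMMAS AND PROOFS =====

-- the body of A's outer loop, as a named function (proof helper only)
def bodyA (d : Int) (l : List Int) (p : List (List Int)) (i : Int) : List (List Int) :=
  (PySem.List.pyRange (i + 1) (PySem.List.len l) 1).foldl (fun p j =>
    let near1 := |(|PySem.List.pyGetD l j 0 - PySem.List.pyGetD l i 0|) - d|
    if near1 < 30 then p ++ [[PySem.List.pyGetD l i 0, PySem.List.pyGetD l j 0]]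
    else p) p

-- A's threshold test |(|y-x|)-d| < 30 is B's interval test, fold form → filter/map form
theorem inner_eq (d x : Int) (rest : List Int) (p : List (List Int)) :
    rest.foldl (fun p y => if |(|y - x|) - d| < 30 then p ++ [[x, y]] else p) p
      = p ++ (rest.filter (fun y => decide (d - 30 < |y - x| ∧ |y - x| < d + 30))).map (fun y => [x, y]) := by
  have := PySem.List.foldl_append_if
      (fun y => decide (|(|y - x|) - d| < 30)) (fun y => [x, (y : Int)]) rest p
  simp only [decide_eq_true_eq] at this
  rw [this]
  congr 2
  apply List.filter_congr
  intro y _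
  rcases abs_cases (|y - x| - d) with ⟨h1, h2⟩ | ⟨h1, h2⟩ <;>
    simp only [decide_eq_decide, h1] <;> omega

-- bodyA at index 0 on (x :: rest) produces x's block
theorem bodyA_zero (d x : Int) (rest : List Int) (p : List (List Int)) :
    bodyA d (x :: rest) p 0
      = p ++ (rest.filter (fun y => decide (d - 30 < |y - x| ∧ |y - x| < d + 30))).map (fun y => [x, y]) := by
  unfold bodyA
  rw [zero_add,
    PySem.List.foldl_pyRange_pyGetD (x :: rest) 0
      (fun p y => let near1 := |(|y - PySem.List.pyGetD (x :: rest) 0 0|) - d|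
        if near1 < 30 then p ++ [[PySem.List.pyGetD (x :: rest) 0 0, y]] else p) p (by omega)]
  simp only [PySem.List.pyGetD_zero_cons, Int.toNat_one, List.drop_succ_cons, List.drop_zero]
  exact inner_eq d x rest p

-- index shift: bodyA at i+1 on (x :: rest) is bodyA at i on rest
theorem bodyA_shift (d x : Int) (rest : List Int) (p : List (List Int)) (i : Int) (hi : 0 ≤ i) :
    bodyA d (x :: rest) p (i + 1) = bodyA d rest p i := by
  unfold bodyA
  have hget : PySem.List.pyGetD (x :: rest) (i + 1) 0 = PySem.List.pyGetD rest i 0 := by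
    rw [PySem.List.pyGetD_of_nonneg _ _ (by omega), PySem.List.pyGetD_of_nonneg _ _ hi]
    have : (i + 1).toNat = i.toNat + 1 := by omega
    rw [this, List.getD_cons_succ]
  rw [PySem.List.foldl_pyRange_pyGetD (x :: rest) 0
      (fun p y => let near1 := |(|y - PySem.List.pyGetD (x :: rest) (i+1) 0|) - d|
        if near1 < 30 then p ++ [[PySem.List.pyGetD (x :: rest) (i+1) 0, y]] else p) p (by omega),
    PySem.List.foldl_pyRange_pyGetD rest 0
      (fun p y => let near1 := |(|y - PySem.List.pyGetD rest i 0|) - d|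
        if near1 < 30 then p ++ [[PySem.List.pyGetD rest i 0, y]] else p) p (by omega)]
  have hdrop : (x :: rest).drop (i + 1 + 1).toNat = rest.drop (i + 1).toNat := by
    have : (i + 1 + 1).toNat = (i + 1).toNat + 1 := by omega
    rw [this, List.drop_succ_cons]
  simp only [hget, hdrop]

-- A's outer loop, started from any accumulator, is B's loop
theorem outer_eq (d : Int) (l : List Int) (p : List (List Int)) :
    (PySem.List.pyRange 0 (PySem.List.len l - 1) 1).foldl (bodyA d l) p
      = altLoop (d - 30) (d + 30) p l := by
  induction l generalizing p with
  | nil => simp [PySem.List.len, PySem.List.pyRange_one_eq_nil, altLoop]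
  | cons x rest ih =>
      rw [altLoop]
      have hlen : PySem.List.len (x :: rest) - 1 = PySem.List.len rest := by
        simp [PySem.List.len]
      rw [hlen]
      by_cases hr : PySem.List.len rest ≤ 0
      · have : rest = [] := by
          cases rest with
          | nil => rfl
          | cons a b => simp [PySem.List.len] at hr; omega
        subst this
        simp [PySem.List.pyRange_one_eq_nil, altLoop]
      · rw [Int.not_le] at hr
        rw [PySem.List.pyRange_one_cons hr, List.foldl_cons, bodyA_zero]
        rw [← ih, zero_add]
        rw [PySem.List.pyRange_one 1 (PySem.List.len rest),
            PySem.List.pyRange_one 0 (PySem.List.len rest - 1)]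
        rw [List.foldl_map, List.foldl_map]
        simp only [Int.sub_zero, zero_add]
        apply PySem.List.foldl_congr_mem
        intro acc k _
        have h1 : (1 : Int) + (k : Int) = (k : Int) + 1 := by omega
        rw [h1, bodyA_shift d x rest acc k (by positivity)]

-- ===== VERDICT (by name: the statement is the Claim_ definition above) =====
theorem find_near_all_spec : Claim_equal_find_near_all := by
  intro find_p distance _
  unfold Spec_find_near_all find_near_all find_near_all_alt
  exact outer_eq distance find_p []
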